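-- pv_equiv track=rewrite | github.com/lsaristo/CS170-Algorithms | DnaRead.py | merge_reads
-- ===== SOURCE A (Python) =====
-- def merge_reads(read1, read2):
--     """ Merge two reads together """
--
--     if read1 in read2:
--         return (read2, len(read1))
--     if read2 in read1:
--         return (read1, len(read2))
--
--     max_string = 0;
--     index = 0;
--     last_found = 0;
--     left = read1[len(read1)-1:]
--     right = read2[:1]
--
--     while left and right and index < min(len(read1), len(read2)):
--         if left == right:
--             last_found = index+1;
--         index += 1
--         left = read1[len(read1)-1-index:]
--         right = read2[:index+1]
--     return (read1 + read2[last_found:], last_found)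
-- ===== SOURCE B (Python) =====
-- def merge_reads(read1, read2):
--     """ Merge two reads together """
--     if read1 in read2:
--         return (read2, len(read1))
--     if read2 in read1:
--         return (read1, len(read2))
--     k = min(len(read1), len(read2))
--     while k > 0 and not read1.endswith(read2[:k]):
--         k -= 1
--     return (read1 + read2[k:], k)
-- ===== Notes on version B (the rewrite author's own statement) =====
-- stated objective: simpler
-- what changed: Replaces A's forward scan that rebuilds and compares both slices at every step while tracking index/last_found/left/right with a single backward countdown from min(len1,len2) that returns at the first (i.e. longest) suffix/prefix match via str.endswith.
import Mathlib
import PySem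

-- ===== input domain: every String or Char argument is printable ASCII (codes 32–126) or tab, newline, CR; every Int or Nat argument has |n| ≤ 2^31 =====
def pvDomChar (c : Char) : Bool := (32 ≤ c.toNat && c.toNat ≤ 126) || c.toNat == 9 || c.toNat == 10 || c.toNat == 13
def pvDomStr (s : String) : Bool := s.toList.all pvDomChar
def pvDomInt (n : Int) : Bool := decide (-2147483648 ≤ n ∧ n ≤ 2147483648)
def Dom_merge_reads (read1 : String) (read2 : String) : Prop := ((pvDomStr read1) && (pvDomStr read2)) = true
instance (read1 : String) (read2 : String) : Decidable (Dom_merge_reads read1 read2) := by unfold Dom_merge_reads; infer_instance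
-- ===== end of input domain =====

-- B replaces A's forward overlap scan (tracking index/last_found/left/right) by a backward
-- countdown from min(len1,len2) that stops at the first, i.e. longest, suffix/prefix match
-- (objective: simpler; same worst-case cost).


-- ===== PORT A =====
-- A's while loop: state (index, last_found, left, right); left/right are recomputed from the
-- incremented index at the end of each body; exit when a slice is empty or index ≥ min.
def mergeLoopA (r1 r2 : List Char) (index last_found : Int) (left right : List Char) : Int :=
  if _h : left ≠ [] ∧ right ≠ [] ∧ index < min r1.length r2.length then
    mergeLoopA r1 r2 (index + 1)
      (if left == right then index + 1 else last_found)
      (PySem.List.slice r1 (some ((r1.length : Int) - 1 - (index + 1))) none)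
      (PySem.List.slice r2 none (some ((index + 1) + 1)))
  else last_found
termination_by ((min r1.length r2.length : Int) - index).toNat
decreasing_by omega

def merge_reads (read1 : String) (read2 : String) : String × Int :=
  if PySem.Str.isIn read1 read2 then (read2, PySem.Str.len read1)
  else if PySem.Str.isIn read2 read1 then (read1, PySem.Str.len read2)
  else
    let r1 := read1.toList
    let r2 := read2.toList
    let lf := mergeLoopA r1 r2 0 0
      (PySem.List.slice r1 (some ((r1.length : Int) - 1)) none)
      (PySem.List.slice r2 none (some 1))
    (String.ofList (r1 ++ PySem.List.slice r2 (some lf) none), lf)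

-- ===== PORT B =====
-- B's while loop: count k down from min(len1,len2), stop at the first k with
-- read1.endswith(read2[:k]) (k = 0 if no overlap matches).
def mergeLoopB (r1 r2 : List Char) : Nat → Nat
  | 0 => 0
  | k + 1 =>
    if PySem.Chars.endswith r1 (PySem.Chars.slice r2 none (some ((k : Int) + 1))) then k + 1
    else mergeLoopB r1 r2 k

def merge_reads_alt (read1 : String) (read2 : String) : String × Int :=
  if PySem.Str.isIn read1 read2 then (read2, PySem.Str.len read1)
  else if PySem.Str.isIn read2 read1 then (read1, PySem.Str.len read2)
  else
    let r1 := read1.toList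
    let r2 := read2.toList
    let k := mergeLoopB r1 r2 (min r1.length r2.length)
    (String.ofList (r1 ++ PySem.List.slice r2 (some (k : Int)) none), (k : Int))

-- ===== PRECONDITION & SPEC =====
def Spec_merge_reads (read1 : String) (read2 : String) (out : String × Int) : Prop := out = merge_reads_alt read1 read2
instance (read1 : String) (read2 : String) (out : String × Int) : Decidable (Spec_merge_reads read1 read2 out) := by unfold Spec_merge_reads; infer_instance

-- ===== CLAIM (what is proved, stated in full; the proofs are below) =====
def Claim_equal_merge_reads : Prop := ∀ (read1 : String) (read2 : String), Dom_merge_reads read1 read2 → Spec_merge_reads read1 read2 (merge_reads read1 read2)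

-- ===== LEMMAS AND PROOFS =====

-- A's slice comparison at step i is B's endswith test for overlap length i+1 (while i < min).
lemma testA_eq_testB (r1 r2 : List Char) (i : Nat) (hi : i < min r1.length r2.length) :
    (PySem.List.slice r1 (some ((r1.length : Int) - 1 - (i : Int))) none
      == PySem.List.slice r2 none (some ((i : Int) + 1)))
    = PySem.Chars.endswith r1 (PySem.Chars.slice r2 none (some ((i : Int) + 1))) := by
  have h1 : i < r1.length := lt_of_lt_of_le hi (by omega)
  have h2 : i < r2.length := lt_of_lt_of_le hi (by omega)
  rw [PySem.List.slice_from r1 (a := (r1.length:Int)-1-i) (by omega)]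
  simp only [PySem.Chars.slice_eq_listSlice]
  rw [PySem.List.slice_to r2 (b := (i:Int)+1) (by omega)]
  have ht : ((i : Int) + 1).toNat = i + 1 := by omega
  have ha : ((r1.length : Int) - 1 - (i : Int)).toNat = r1.length - (i + 1) := by omega
  rw [ht, ha, Bool.eq_iff_iff]
  simp only [beq_iff_eq, PySem.Chars.endswith_iff]
  rw [List.suffix_iff_eq_drop, List.length_take, min_eq_left (by omega)]
  exact ⟨fun h => h.symm, fun h => h.symm⟩

-- the 'left' slice is nonempty while the loop runs
lemma left_ne_nil (r1 : List Char) (i : Nat) (hi : i < r1.length) :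
    PySem.List.slice r1 (some ((r1.length : Int) - 1 - (i : Int))) none ≠ [] := by
  rw [PySem.List.slice_from r1 (a := (r1.length:Int)-1-i) (by omega)]
  simp only [ne_eq, List.drop_eq_nil_iff]
  omega

-- the 'right' slice is nonempty while read2 is nonempty
lemma right_ne_nil (r2 : List Char) (h2 : r2 ≠ []) (i : Nat) :
    PySem.List.slice r2 none (some ((i : Int) + 1)) ≠ [] := by
  rw [PySem.List.slice_to r2 (b := (i:Int)+1) (by omega)]
  simp only [ne_eq, List.take_eq_nil_iff, not_or]
  refine ⟨by omega, h2⟩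

-- invariant: entering A's loop at index i with last_found = mergeLoopB r1 r2 i
-- (the longest matching overlap of length ≤ i) yields mergeLoopB at min(len1,len2)
lemma loopA_eq_loopB (r1 r2 : List Char) (h2 : r2 ≠ []) :
    ∀ (d i : Nat), i + d = min r1.length r2.length →
    mergeLoopA r1 r2 (i : Int) ((mergeLoopB r1 r2 i : Nat) : Int)
      (PySem.List.slice r1 (some ((r1.length : Int) - 1 - (i : Int))) none)
      (PySem.List.slice r2 none (some ((i : Int) + 1)))
    = ((mergeLoopB r1 r2 (min r1.length r2.length) : Nat) : Int) := by
  intro d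
  induction d with
  | zero =>
    intro i hi
    rw [mergeLoopA]
    rw [dif_neg]
    · rw [Nat.add_zero] at hi; rw [hi]
    · rintro ⟨-, -, h3⟩; omega
  | succ d ih =>
    intro i hi
    have hiM : i < min r1.length r2.length := by omega
    rw [mergeLoopA]
    rw [dif_pos ⟨left_ne_nil r1 i (by omega), right_ne_nil r2 h2 i,
      by exact_mod_cast (by omega : (i:Int) < (min r1.length r2.length : Nat))⟩]
    have harg : (if (PySem.List.slice r1 (some ((r1.length : Int) - 1 - (i : Int))) none
        == PySem.List.slice r2 none (some ((i : Int) + 1))) then (i : Int) + 1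
        else ((mergeLoopB r1 r2 i : Nat) : Int))
        = ((mergeLoopB r1 r2 (i+1) : Nat) : Int) := by
      rw [testA_eq_testB r1 r2 i hiM, mergeLoopB]
      rw [apply_ite (fun n : Nat => (n : Int))]
      push_cast
      rfl
    rw [harg]
    have := ih (i+1) (by omega)
    push_cast at this ⊢
    convert this using 3

-- ===== VERDICT (by name: the statement is the Claim_ definition above) =====
theorem merge_reads_spec : Claim_equal_merge_reads := by
  intro read1 read2 _
  unfold Spec_merge_reads merge_reads merge_reads_alt
  by_cases hA : PySem.Chars.isIn read1.toList read2.toList = true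
  · simp [PySem.Str.isIn_eq, hA]
  · by_cases hB : PySem.Chars.isIn read2.toList read1.toList = true
    · simp [PySem.Str.isIn_eq, hA, hB]
    · simp only [PySem.Str.isIn_eq, hA, hB, if_false, Bool.false_eq_true]
      have h2 : read2.toList ≠ [] := by
        intro h
        apply hB
        rw [h]
        exact PySem.Chars.isIn_nil read1.toList
      have key := loopA_eq_loopB read1.toList read2.toList h2
        (min read1.toList.length read2.toList.length) 0 (by omega)
      norm_num [mergeLoopB] at key
      simp only [String.length_toList]
      rw [key]
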